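-- pv_equiv track=rewrite | github.com/brunchmate/-AlgorithmStudy | guts27/2018 KAKAO BLIND RECRUITMENT/[3차]방금그곡.py | solution
-- ===== SOURCE A (Python) =====
-- def change(string):
--     string = string.replace('C#','c')
--     string = string.replace('D#','d')
--     string = string.replace('F#','f')
--     string = string.replace('G#','g')
--     string = string.replace('A#','a')
--     return string
--
-- def solution(m, musicinfos):
--     answer = []
-- # 문자 변환
--     m = change(m)
-- # 안에있는거 다담고 재생시간. 제목
--     for i in range(len(musicinfos)):
--         start,end,name,music = musicinfos[i].split(',')
--         music = change(music)
--         s,e = map(int,start.split(':'))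
--         start = s*60 +e
--         s,e = map(int,end.split(':'))
--         end = s*60+e
--         time = end-start
--         if time < len(music):
--             music = music[0:time]
--         else:
--             q,r = divmod(time,len(music))
--             music = music*q + music[0:r]
--
--         if m in music:
--             answer.append((time,i,name))
-- # 재생시간엔먼저입력된순 반환
--     if len(answer) == 0:
--         return '(None)'
--     answer.sort(key = lambda x :(-x[0],x[1]))
--     return answer[0][2]
-- ===== SOURCE B (Python) =====
-- def change(string):
--     string = string.replace('C#','c')
--     string = string.replace('D#','d')
--     string = string.replace('F#','f')
--     string = string.replace('G#','g')
--     string = string.replace('A#','a')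
--     return string
--
-- def solution(m, musicinfos):
--     m = change(m)
--     best = None  # (time, name) of the best match so far
--     for info in musicinfos:
--         start, end, name, music = info.split(',')
--         music = change(music)
--         s, e = map(int, start.split(':'))
--         start = s * 60 + e
--         s, e = map(int, end.split(':'))
--         end = s * 60 + e
--         time = end - start
--         if time < len(music):
--             music = music[0:time]
--         else:
--             q, r = divmod(time, len(music))
--             music = music * q + music[0:r]
--         if m in music and (best is None or best[0] < time):
--             best = (time, name)
--     return '(None)' if best is None else best[1]
-- ===== Notes on version B (the rewrite author's own statement) =====
-- stated objective: simpler
-- what changed: B keeps A's parsing/melody-reconstruction loop but replaces the collect-all-matches list sorted by (-time, index) with a single running best updated only on strictly greater play time, returning '(None)' if no match.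
import Mathlib
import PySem

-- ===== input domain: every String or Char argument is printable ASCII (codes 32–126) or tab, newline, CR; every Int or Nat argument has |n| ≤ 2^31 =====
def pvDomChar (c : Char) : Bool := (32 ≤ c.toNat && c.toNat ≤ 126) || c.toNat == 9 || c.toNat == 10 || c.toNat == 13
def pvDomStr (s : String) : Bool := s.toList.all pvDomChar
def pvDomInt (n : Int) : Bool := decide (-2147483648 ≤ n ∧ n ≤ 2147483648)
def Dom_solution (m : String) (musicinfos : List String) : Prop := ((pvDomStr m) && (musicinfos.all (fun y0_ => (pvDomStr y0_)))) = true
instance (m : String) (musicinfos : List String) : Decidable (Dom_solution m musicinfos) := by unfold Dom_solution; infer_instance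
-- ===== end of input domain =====

-- B replaces A's collect-all-matches-then-sort-by-(-time,index) selection with a single-pass
-- running best (replace only on strictly greater play time), keeping the same parsing; objective: simpler.

-- ===== PORT A =====
-- change(string): the five '#'-note replacements
def pvChange (s : String) : String :=
  PySem.Str.replace (PySem.Str.replace (PySem.Str.replace (PySem.Str.replace
    (PySem.Str.replace s "C#" "c") "D#" "d") "F#" "f") "G#" "g") "A#" "a"

-- "s,e = map(int, t.split(':')); s*60+e"  (none exactly where Python raises ValueError)
def pvParseMS (t : String) : Option Int :=
  match PySem.Str.split? t ":" with
  | some [a, b] =>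
    match PySem.Int.ofStr? a, PySem.Int.ofStr? b with
    | some x, some y => some (x * 60 + y)
    | _, _ => none
  | _ => none

-- one loop body's parsing/melody reconstruction, shared verbatim by both Pythons:
-- returns (time, name, m in music) or none exactly where Python raises (bad unpack, bad int,
-- divmod by an empty melody).  'music * q' is ported as replicate/flatten on the code points;
-- q = time // len ≥ 1 in that branch, so q.toNat is exact.
def pvEntry (m' : String) (info : String) : Option (Int × String × Bool) :=
  match PySem.Str.split? info "," with
  | some [st, en, name, music] =>
    match pvParseMS st, pvParseMS en with
    | some a, some b =>
      let music' := pvChange music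
      let time := b - a
      if time < PySem.Str.len music' then
        some (time, name, PySem.Str.isIn m' (PySem.Str.slice music' (some 0) (some time)))
      else if PySem.Str.len music' = 0 then none
      else
        let q := PySem.Int.floordiv time (PySem.Str.len music')
        let r := PySem.Int.mod time (PySem.Str.len music')
        some (time, name, PySem.Chars.isIn m'.toList
          ((List.replicate q.toNat music'.toList).flatten ++
            PySem.List.slice music'.toList (some 0) (some r)))
    | _, _ => none
  | _ => none

-- A's loop body: append (time, i, name) on a match
def pvLoopA (m' : String) (acc : List (Int × Int × String)) (p : Int × String) :
    List (Int × Int × String) :=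
  match pvEntry m' p.2 with
  | some (t, name, matched) => if matched then acc ++ [(t, p.1, name)] else acc
  | none => acc

def solution (m : String) (musicinfos : List String) : String :=
  let m' := pvChange m
  let answer := (PySem.List.enumerate musicinfos 0).foldl (pvLoopA m') []
  if answer.length = 0 then "(None)"
  else
    match PySem.List.sorted answer (fun x => toLex (-x.1, x.2.1)) false with
    | [] => "(None)"
    | x :: _ => x.2.2

-- ===== PORT B =====
-- B's loop body: keep the best (time, name), replacing only on strictly greater time
def pvLoopB (m' : String) (best : Option (Int × String)) (info : String) :
    Option (Int × String) :=
  match pvEntry m' info with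
  | some (t, name, matched) =>
    if matched then
      match best with
      | none => some (t, name)
      | some (bt, bn) => if bt < t then some (t, name) else some (bt, bn)
    else best
  | none => best

def solution_alt (m : String) (musicinfos : List String) : String :=
  let m' := pvChange m
  match musicinfos.foldl (pvLoopB m') none with
  | none => "(None)"
  | some (_, name) => name

-- ===== PRECONDITION & SPEC =====
-- Pre_ holds exactly where Python A returns: every entry splits into 4 comma fields, both
-- times are two ':'-separated ints, and the (converted) melody is nonempty unless the play
-- time is negative (an empty melody with nonnegative time is a ZeroDivisionError in A).
def pvEntryOk (info : String) : Bool :=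
  match PySem.Str.split? info "," with
  | some [st, en, _, music] =>
    match pvParseMS st, pvParseMS en with
    | some a, some b => PySem.Str.len (pvChange music) ≠ 0 || b - a < 0
    | _, _ => false
  | _ => false

def Pre_solution (m : String) (musicinfos : List String) : Prop :=
  ∀ info ∈ musicinfos, pvEntryOk info = true
instance (m : String) (musicinfos : List String) : Decidable (Pre_solution m musicinfos) := by
  unfold Pre_solution; infer_instance

def pvWitness_solution : String × List String :=
  ("ABC", ["12:00,12:14,WORLD,ABCDEF"])

def Spec_solution (m : String) (musicinfos : List String) (out : String) : Prop :=
  out = solution_alt m musicinfos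
instance (m : String) (musicinfos : List String) (out : String) :
    Decidable (Spec_solution m musicinfos out) := by unfold Spec_solution; infer_instance

-- ===== CLAIM (what is proved, stated in full; the proofs are below) =====
def Claim_equal_solution : Prop := ∀ (m : String) (musicinfos : List String),
  Dom_solution m musicinfos → Pre_solution m musicinfos →
  Spec_solution m musicinfos (solution m musicinfos)

-- ===== LEMMAS AND PROOFS =====

-- the list contribution of one enumerated entry (what A appends there)
def pvG (m' : String) (p : Int × String) : List (Int × Int × String) :=
  match pvEntry m' p.2 with
  | some (t, name, matched) => if matched then [(t, p.1, name)] else []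
  | none => []

-- the selection step of B, lifted to A's triples
def pvStep3 (b : Option (Int × Int × String)) (x : Int × Int × String) :
    Option (Int × Int × String) :=
  match b with
  | none => some x
  | some p => if p.1 < x.1 then some x else some p

def pvProj (x : Int × Int × String) : Int × String := (x.1, x.2.2)

theorem pvLoopA_eq (m' : String) (acc : List (Int × Int × String)) (p : Int × String) :
    pvLoopA m' acc p = acc ++ pvG m' p := by
  unfold pvLoopA pvG
  rcases h : pvEntry m' p.2 with _ | ⟨t, name, matched⟩ <;> simp
  cases matched <;> simp

theorem foldA_eq (m' : String) (xs : List (Int × String)) (acc : List (Int × Int × String)) :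
    xs.foldl (pvLoopA m') acc = acc ++ xs.flatMap (pvG m') := by
  induction xs generalizing acc with
  | nil => simp
  | cons x xs ih => simp [pvLoopA_eq, ih]

theorem foldB_fusion (m' : String) (xs : List String) (k : Int)
    (b : Option (Int × Int × String)) :
    xs.foldl (pvLoopB m') (b.map pvProj) =
      (((PySem.List.enumerate xs k).flatMap (pvG m')).foldl pvStep3 b).map pvProj := by
  induction xs generalizing k b with
  | nil => simp [PySem.List.enumerate]
  | cons x xs ih =>
    have henum : PySem.List.enumerate (x :: xs) k = (k, x) :: PySem.List.enumerate xs (k + 1) := rfl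
    rw [henum]
    simp only [List.flatMap_cons, List.foldl_append, List.foldl_cons]
    have hstep : pvLoopB m' (b.map pvProj) x = ((pvG m' (k, x)).foldl pvStep3 b).map pvProj := by
      unfold pvLoopB pvG
      rcases h : pvEntry m' x with _ | ⟨t, name, matched⟩
      · simp
      · cases matched
        · simp
        · rcases b with _ | ⟨bt, bi, bn⟩
          · simp [pvStep3, pvProj]
          · by_cases hbt : bt < t <;> simp [pvStep3, pvProj, hbt]
    rw [hstep]
    exact ih (k + 1) _

-- "best" characterisation: maximal time, earliest index among equals
def pvIsBest (l : List (Int × Int × String)) (x : Int × Int × String) : Prop :=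
  x ∈ l ∧ ∀ y ∈ l, y.1 ≤ x.1 ∧ (y.1 = x.1 → x.2.1 ≤ y.2.1)

theorem fold3_isBest (l : List (Int × Int × String))
    (hp : l.Pairwise (fun a b => a.2.1 < b.2.1)) :
    (l = [] ∧ l.foldl pvStep3 none = none) ∨
      ∃ x, l.foldl pvStep3 none = some x ∧ pvIsBest l x := by
  induction l using List.reverseRecOn with
  | nil => exact Or.inl ⟨rfl, rfl⟩
  | append_singleton l x ih =>
    rw [List.pairwise_append] at hp
    obtain ⟨hpl, -, hlt⟩ := hp
    have hlt' : ∀ a ∈ l, a.2.1 < x.2.1 := fun a ha => hlt a ha x (by simp)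
    right
    rw [List.foldl_append, List.foldl_cons, List.foldl_nil]
    rcases ih hpl with ⟨hnil, hfold⟩ | ⟨m, hfold, hm, hbest⟩
    · subst hnil
      refine ⟨x, by simp [hfold, pvStep3], by simp, ?_⟩
      intro y hy
      simp at hy
      subst hy
      exact ⟨le_refl _, fun _ => le_refl _⟩
    · rw [hfold]
      unfold pvStep3
      by_cases hc : m.1 < x.1
      · refine ⟨x, by simp [hc], by simp, ?_⟩
        intro y hy
        rcases List.mem_append.1 hy with hyl | hyx
        · have := (hbest y hyl).1
          exact ⟨le_of_lt (lt_of_le_of_lt this hc), fun h => absurd h (by omega)⟩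
        · simp at hyx; subst hyx
          exact ⟨le_refl _, fun _ => le_refl _⟩
      · refine ⟨m, by simp [hc], List.mem_append_left _ hm, ?_⟩
        intro y hy
        rcases List.mem_append.1 hy with hyl | hyx
        · exact hbest y hyl
        · simp at hyx; subst hyx
          exact ⟨by omega, fun _ => le_of_lt (hlt' m hm)⟩

theorem idx_eq_unique (l : List (Int × Int × String))
    (hp : l.Pairwise (fun a b => a.2.1 < b.2.1)) {x y : Int × Int × String}
    (hx : x ∈ l) (hy : y ∈ l) (h : x.2.1 = y.2.1) : x = y := by
  induction l with
  | nil => cases hx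
  | cons a l ih =>
    rcases List.pairwise_cons.1 hp with ⟨ha, hpl⟩
    rcases List.mem_cons.1 hx with hxa | hx' <;> rcases List.mem_cons.1 hy with hya | hy'
    · rw [hxa, hya]
    · subst hxa; exact absurd h (by have := ha y hy'; omega)
    · subst hya; exact absurd h (by have := ha x hx'; omega)
    · exact ih hpl hx' hy' 

theorem isBest_unique (l : List (Int × Int × String))
    (hp : l.Pairwise (fun a b => a.2.1 < b.2.1)) {x y : Int × Int × String}
    (hx : pvIsBest l x) (hy : pvIsBest l y) : x = y := by
  obtain ⟨hxm, hxb⟩ := hx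
  obtain ⟨hym, hyb⟩ := hy
  have h1 := hxb y hym
  have h2 := hyb x hxm
  have ht : x.1 = y.1 := le_antisymm h2.1 h1.1
  have hi : x.2.1 = y.2.1 := le_antisymm (h1.2 ht.symm) (h2.2 ht)
  exact idx_eq_unique l hp hxm hym hi

theorem sorted_head_isBest (l : List (Int × Int × String)) (m : Int × Int × String)
    (t : List (Int × Int × String))
    (h : PySem.List.sorted l (fun x => toLex (-x.1, x.2.1)) false = m :: t) :
    pvIsBest l m := by
  have hmem : m ∈ l := by
    have := PySem.List.sorted_perm (xs := l) (key := fun x => toLex (-x.1, x.2.1)) (rev := false)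
    rw [h] at this
    exact this.mem_iff.1 (List.mem_cons_self)
  refine ⟨hmem, fun y hy => ?_⟩
  have hle := PySem.List.key_head_sorted_le l (fun x => toLex (-x.1, x.2.1)) h y hy
  rw [Prod.Lex.le_iff] at hle
  simp only [ofLex_toLex] at hle
  constructor
  · omega
  · intro he
    rcases hle with h1 | ⟨_, h2⟩
    · omega
    · exact h2

theorem mem_enum_fst_le {α : Type} (xs : List α) (k : Int) (p : Int × α)
    (h : p ∈ PySem.List.enumerate xs k) : k ≤ p.1 := by
  induction xs generalizing k with
  | nil => cases h
  | cons x xs ih =>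
    rw [show PySem.List.enumerate (x :: xs) k = (k, x) :: PySem.List.enumerate xs (k + 1) from rfl] at h
    rcases List.mem_cons.1 h with hpa | h'
    · rw [hpa]
    · have := ih (k + 1) h'; omega

theorem enum_pairwise {α : Type} (xs : List α) (k : Int) :
    (PySem.List.enumerate xs k).Pairwise (fun p q => p.1 < q.1) := by
  induction xs generalizing k with
  | nil => exact List.Pairwise.nil
  | cons x xs ih =>
    refine List.Pairwise.cons (fun q hq => ?_) (ih (k + 1))
    have := mem_enum_fst_le xs (k + 1) q hq
    omega

theorem mem_pvG_idx (m' : String) (p : Int × String) (u : Int × Int × String)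
    (h : u ∈ pvG m' p) : u.2.1 = p.1 := by
  unfold pvG at h
  rcases he : pvEntry m' p.2 with _ | ⟨t, name, matched⟩ <;> rw [he] at h
  · cases h
  · cases matched <;> simp at h
    subst h; rfl

theorem ans_pairwise (m' : String) (xs : List String) (k : Int) :
    ((PySem.List.enumerate xs k).flatMap (pvG m')).Pairwise (fun a b => a.2.1 < b.2.1) := by
  rw [List.pairwise_flatMap]
  constructor
  · intro p _
    unfold pvG
    rcases pvEntry m' p.2 with _ | ⟨t, name, matched⟩
    · exact List.Pairwise.nil
    · cases matched <;> simp
  · refine (enum_pairwise xs k).imp_of_mem ?_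
    intro p q _ _ hpq u hu v hv
    rw [mem_pvG_idx m' p u hu, mem_pvG_idx m' q v hv]
    exact hpq

theorem solution_eq_alt (m : String) (musicinfos : List String) :
    solution m musicinfos = solution_alt m musicinfos := by
  simp only [solution, solution_alt]
  have hA := foldA_eq (pvChange m) (PySem.List.enumerate musicinfos 0) []
  have hB := foldB_fusion (pvChange m) musicinfos 0 none
  simp only [List.nil_append] at hA
  simp only [Option.map_none] at hB
  set ans := (PySem.List.enumerate musicinfos 0).flatMap (pvG (pvChange m)) with hans
  rw [hA, hB]
  have hp := ans_pairwise (pvChange m) musicinfos 0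
  rw [← hans] at hp
  rcases fold3_isBest ans hp with ⟨hnil, hfold⟩ | ⟨x, hfold, hbx⟩
  · rw [hfold, hnil]
    simp
  · rw [hfold]
    have hne : ans ≠ [] := by
      intro h; rw [h] at hbx; exact absurd hbx.1 (List.not_mem_nil)
    have hlen : ans.length ≠ 0 := fun h => hne (List.length_eq_zero_iff.1 h)
    rw [if_neg hlen]
    rcases hs : PySem.List.sorted ans (fun x => toLex (-x.1, x.2.1)) false with _ | ⟨hd, tl⟩
    · exfalso
      have hperm := PySem.List.sorted_perm (xs := ans) (key := fun x => toLex (-x.1, x.2.1)) (rev := false)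
      rw [hs] at hperm
      exact hne (List.Perm.eq_nil hperm.symm)
    · have hbhd := sorted_head_isBest ans hd tl hs
      have : x = hd := isBest_unique ans hp hbx hbhd
      subst this
      simp [pvProj]

-- ===== VERDICT (by name: the statement is the Claim_ definition above) =====
theorem solution_spec : Claim_equal_solution := by
  intro m musicinfos _ _
  unfold Spec_solution
  exact solution_eq_alt m musicinfos
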